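-- pv_equiv track=rewrite | github.com/jed1337/Kattis | golomb_rulers.py | is_ruler
-- ===== SOURCE A (Python) =====
-- def is_ruler(marks):
--     combinations = []
--     for i in range(len(marks)):
--         for j in range(i + 1, len(marks)):
--             if i < 0 or j < 0:
--                 return False
--             difference = marks[j] - marks[i]
--             if difference in combinations:
--                 return False
--             else:
--                 combinations.append(difference)
--     return True
-- ===== SOURCE B (Python) =====
-- def is_ruler(marks):
--     n = len(marks)
--     diffs = sorted(marks[j] - marks[i] for i in range(n) for j in range(i + 1, n))
--     return all(x != y for x, y in zip(diffs, diffs[1:]))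
-- ===== Notes on version B (the rewrite author's own statement) =====
-- stated objective: alternative
-- what changed: A interleaves generation with a linear membership scan of the growing list and an early return per pair; B contains no membership test at all: it materialises all pairwise differences, sorts them, and returns whether no two adjacent entries of the sorted list are equal.
import Mathlib
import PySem

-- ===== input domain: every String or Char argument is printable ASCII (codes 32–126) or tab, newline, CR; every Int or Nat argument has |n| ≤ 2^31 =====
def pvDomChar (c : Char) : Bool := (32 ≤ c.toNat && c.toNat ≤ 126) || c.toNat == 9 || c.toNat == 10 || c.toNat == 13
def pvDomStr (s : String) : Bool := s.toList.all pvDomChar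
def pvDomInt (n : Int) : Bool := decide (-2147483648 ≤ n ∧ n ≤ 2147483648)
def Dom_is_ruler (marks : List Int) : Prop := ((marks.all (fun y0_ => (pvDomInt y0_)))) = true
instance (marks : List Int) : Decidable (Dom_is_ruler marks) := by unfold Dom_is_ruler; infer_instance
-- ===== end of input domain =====

-- B replaces A's interleaved membership-scan loop by sort-then-adjacent-scan: it materialises
-- all pairwise differences, sorts them, and returns whether no two neighbours are equal
-- (objective: alternative; no membership test or set at all).

-- ===== PORT A =====
-- inner loop: for j in range(i+1, len(marks)), with the running 'combinations' list;
-- none models the early 'return False'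
def pvInnerA (marks : List Int) (i : Nat) : List Nat → List Int → Option (List Int)
  | [], combs => some combs
  | j :: js, combs =>
    let difference := marks.getD j 0 - marks.getD i 0
    if combs.contains difference then none
    else pvInnerA marks i js (combs ++ [difference])

-- outer loop: for i in range(len(marks))
def pvOuterA (marks : List Int) : List Nat → List Int → Bool
  | [], _ => true
  | i :: is, combs =>
    match pvInnerA marks i (List.range' (i + 1) (marks.length - (i + 1))) combs with
    | none => false
    | some combs' => pvOuterA marks is combs'

def is_ruler (marks : List Int) : Bool :=
  pvOuterA marks (List.range marks.length) []

-- ===== PORT B =====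
-- the generator (marks[j] - marks[i] for i in range(n) for j in range(i+1, n))
def pvDiffs (marks : List Int) : List Int :=
  (List.range marks.length).flatMap (fun i =>
    (List.range' (i + 1) (marks.length - (i + 1))).map
      (fun j => marks.getD j 0 - marks.getD i 0))

-- all(x != y for x, y in zip(diffs, diffs[1:]))
def pvAdjAll (l : List Int) : Bool :=
  (l.zip l.tail).all (fun p => p.1 != p.2)

def is_ruler_alt (marks : List Int) : Bool :=
  pvAdjAll (PySem.List.sorted (pvDiffs marks) (fun x => x) false)

-- ===== PRECONDITION & SPEC =====
def Spec_is_ruler (marks : List Int) (out : Bool) : Prop := out = is_ruler_alt marks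
instance (marks : List Int) (out : Bool) : Decidable (Spec_is_ruler marks out) := by unfold Spec_is_ruler; infer_instance

-- ===== CLAIM =====
def Claim_equal_is_ruler : Prop := ∀ (marks : List Int), Dom_is_ruler marks → Spec_is_ruler marks (is_ruler marks)

-- ===== LEMMAS AND PROOFS =====

-- A's interleaved loop, abstracted over an already-built difference list
def pvScan : List Int → List Int → Option (List Int)
  | [], combs => some combs
  | d :: ds, combs =>
    if combs.contains d then none else pvScan ds (combs ++ [d])

theorem pvInnerA_eq_scan (marks : List Int) (i : Nat) (js : List Nat) (combs : List Int) :
    pvInnerA marks i js combs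
      = pvScan (js.map (fun j => marks.getD j 0 - marks.getD i 0)) combs := by
  induction js generalizing combs with
  | nil => rfl
  | cons j js ih =>
    simp only [pvInnerA, pvScan, List.map]
    split <;> simp [ih]

theorem pvScan_append (l₁ l₂ combs : List Int) :
    pvScan (l₁ ++ l₂) combs = (pvScan l₁ combs).bind (fun c => pvScan l₂ c) := by
  induction l₁ generalizing combs with
  | nil => rfl
  | cons d ds ih =>
    simp only [List.cons_append, pvScan]
    split <;> simp [ih]

theorem pvOuterA_eq_scan (marks : List Int) (is : List Nat) (combs : List Int) :
    pvOuterA marks is combs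
      = (pvScan (is.flatMap (fun i =>
          (List.range' (i + 1) (marks.length - (i + 1))).map
            (fun j => marks.getD j 0 - marks.getD i 0))) combs).isSome := by
  induction is generalizing combs with
  | nil => rfl
  | cons i is ih =>
    simp only [pvOuterA, List.flatMap_cons, pvScan_append, pvInnerA_eq_scan]
    rcases h : pvScan ((List.range' (i + 1) (marks.length - (i + 1))).map
        (fun j => marks.getD j 0 - marks.getD i 0)) combs with _ | c
    · simp
    · simp [ih]

theorem pvScan_isSome (ds : List Int) (combs : List Int) (h : combs.Nodup) :
    (pvScan ds combs).isSome = true ↔ (combs ++ ds).Nodup := by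
  induction ds generalizing combs with
  | nil => simp [pvScan, h]
  | cons d ds ih =>
    simp only [pvScan]
    by_cases hd : d ∈ combs
    · have hrhs : ¬ (combs ++ d :: ds).Nodup := by
        intro hnd
        rw [List.nodup_append] at hnd
        exact hnd.2.2 d hd d (by simp) rfl
      rw [if_pos (List.contains_iff_mem.mpr hd)]
      simp [hrhs]
    · rw [if_neg (by simp only [List.contains_iff_mem]; exact hd)]
      have h' : (combs ++ [d]).Nodup := by
        rw [List.nodup_append]
        refine ⟨h, List.nodup_singleton _, ?_⟩
        intro a ha b hb
        have hbd : b = d := by simpa using hb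
        subst hbd
        intro h'
        exact hd (h' ▸ ha)
      rw [ih _ h']
      constructor
      · intro hnd
        simpa [List.append_assoc] using hnd
      · intro hnd
        simpa [List.append_assoc] using hnd

-- on a ≤-sorted list, "no two neighbours equal" is exactly strict increase
theorem pvAdjAll_iff_lt (l : List Int) (hle : l.Pairwise (· ≤ ·)) :
    pvAdjAll l = true ↔ l.Pairwise (· < ·) := by
  induction l with
  | nil => simp [pvAdjAll]
  | cons a t ih =>
    cases t with
    | nil => simp [pvAdjAll]
    | cons b t' =>
      obtain ⟨hab, hle'⟩ := List.pairwise_cons.mp hle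
      have hab' : a ≤ b := hab b (by simp)
      have ih' := ih hle'
      have hstep : pvAdjAll (a :: b :: t') = ((a != b) && pvAdjAll (b :: t')) := by
        simp [pvAdjAll]
      rw [hstep]
      constructor
      · intro h
        obtain ⟨hne, hrest⟩ := Bool.and_eq_true_iff.mp h
        have hlt' := ih'.mp hrest
        have hanb : a ≠ b := by simpa using hne
        have haltb : a < b := lt_of_le_of_ne hab' hanb
        refine List.pairwise_cons.mpr ⟨?_, hlt'⟩
        intro x hx
        rcases List.mem_cons.mp hx with rfl | hx'
        · exact haltb
        · have hbx : b ≤ x := by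
            have := (List.pairwise_cons.mp hlt').1 x hx'
            exact le_of_lt this
          exact lt_of_lt_of_le haltb hbx
      · intro h
        obtain ⟨hhd, hlt'⟩ := List.pairwise_cons.mp h
        refine Bool.and_eq_true_iff.mpr ⟨?_, ih'.mpr hlt'⟩
        have : a < b := hhd b (by simp)
        simpa using ne_of_lt this

-- ===== VERDICT =====
theorem is_ruler_spec : Claim_equal_is_ruler := by
  intro marks _
  unfold Spec_is_ruler
  have hA : is_ruler marks = true ↔ (pvDiffs marks).Nodup := by
    unfold is_ruler pvDiffs
    rw [pvOuterA_eq_scan, pvScan_isSome _ [] (by simp)]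
    simp
  have hperm : (PySem.List.sorted (pvDiffs marks) (fun x => x) false).Perm (pvDiffs marks) :=
    PySem.List.sorted_perm _ _ _
  have hle : (PySem.List.sorted (pvDiffs marks) (fun x => x) false).Pairwise (· ≤ ·) :=
    PySem.List.sorted_pairwise _ _
  have hB : is_ruler_alt marks = true ↔ (pvDiffs marks).Nodup := by
    unfold is_ruler_alt
    rw [pvAdjAll_iff_lt _ hle]
    constructor
    · intro h
      exact hperm.nodup_iff.mp (h.imp fun {a b} hab => ne_of_lt hab)
    · intro h
      have hnd : (PySem.List.sorted (pvDiffs marks) (fun x => x) false).Nodup :=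
        hperm.nodup_iff.mpr h
      exact hle.and hnd |>.imp fun {a b} hab =>
        lt_of_le_of_ne hab.1 hab.2
    
  rw [Bool.eq_iff_iff]
  exact hA.trans hB.symm
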